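-- pv_equiv track=rewrite | github.com/noahmaier17/Card-Venture-Game-Recruiter-Demo | web_app/app.py | convert_color_to_color
-- ===== SOURCE A (Python) =====
-- def convert_color_to_color(html_text: str) -> str:
--
--     color_to_color = {
--         "#ff0000": "#ff5555",  # red
--         "#00ff00": "#50fa7b",  # green
--         "#ffff00": "#f1fa8c",  # yellow
--         "#0000ff": "#6272a4",  # blue
--         "#ff00ff": "#ff79c6",  # magenta
--         "#00ffff": "#8be9fd",  # cyan
--         "#ffffff": "#bbbbbb",  # white
--     }
--
--     for former_color, latter_color in color_to_color.items():
--         html_text = html_text.replace(former_color, latter_color)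
--     return html_text
-- ===== SOURCE B (Python) =====
-- def convert_color_to_color(html_text: str) -> str:
--     color_to_color = {
--         "#ff0000": "#ff5555",  # red
--         "#00ff00": "#50fa7b",  # green
--         "#ffff00": "#f1fa8c",  # yellow
--         "#0000ff": "#6272a4",  # blue
--         "#ff00ff": "#ff79c6",  # magenta
--         "#00ffff": "#8be9fd",  # cyan
--         "#ffffff": "#bbbbbb",  # white
--     }
--     out = []
--     i = 0
--     n = len(html_text)
--     while i < n:
--         repl = color_to_color.get(html_text[i:i + 7])
--         if repl is not None:
--             out.append(repl)
--             i += 7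
--         else:
--             out.append(html_text[i])
--             i += 1
--     return "".join(out)
-- ===== Notes on version B (the rewrite author's own statement) =====
-- stated objective: alternative
-- what changed: B makes a single left-to-right scan of the string, emitting the mapped replacement for any 7-char window found in the color table and skipping past it, instead of A's seven sequential whole-string replace passes.
import Mathlib
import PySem

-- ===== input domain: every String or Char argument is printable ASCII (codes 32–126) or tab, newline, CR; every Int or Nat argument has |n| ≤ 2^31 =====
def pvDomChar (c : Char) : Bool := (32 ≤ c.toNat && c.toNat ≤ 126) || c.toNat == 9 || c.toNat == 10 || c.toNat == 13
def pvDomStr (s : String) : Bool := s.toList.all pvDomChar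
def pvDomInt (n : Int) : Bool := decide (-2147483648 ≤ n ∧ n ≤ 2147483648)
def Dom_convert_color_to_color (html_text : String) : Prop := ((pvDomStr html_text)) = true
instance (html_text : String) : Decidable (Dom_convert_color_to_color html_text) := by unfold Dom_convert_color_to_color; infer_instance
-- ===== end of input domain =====

-- B replaces A's seven sequential whole-string replace passes by one left-to-right scan
-- that maps each matched 7-char color token through the table (objective: alternative, not faster).

-- ===== PORT A =====
-- literal port of A: build the dict, then one str.replace pass per (former, latter) item
def convert_color_to_color (html_text : String) : String :=
  let color_to_color : PySem.Dict String String := PySem.Dict.mk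
    [("#ff0000", "#ff5555"),  -- red
     ("#00ff00", "#50fa7b"),  -- green
     ("#ffff00", "#f1fa8c"),  -- yellow
     ("#0000ff", "#6272a4"),  -- blue
     ("#ff00ff", "#ff79c6"),  -- magenta
     ("#00ffff", "#8be9fd"),  -- cyan
     ("#ffffff", "#bbbbbb")]  -- white
  color_to_color.items.foldl (fun h p => PySem.Str.replace h p.1 p.2) html_text

-- ===== PORT B =====
-- the color table of Source B, as lists of chars
def pvPairs : List (List Char × List Char) :=
  [("#ff0000".toList, "#ff5555".toList),
   ("#00ff00".toList, "#50fa7b".toList),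
   ("#ffff00".toList, "#f1fa8c".toList),
   ("#0000ff".toList, "#6272a4".toList),
   ("#ff00ff".toList, "#ff79c6".toList),
   ("#00ffff".toList, "#8be9fd".toList),
   ("#ffffff".toList, "#bbbbbb".toList)]

-- Source B's `color_to_color.get(chunk)`: first-match lookup in the table
def pvFind (a : List Char) : List (List Char × List Char) → Option (List Char)
  | [] => none
  | (k, r) :: ps => if a = k then some r else pvFind a ps

-- Source B's while loop: one pass; on a table hit emit the replacement and skip 7 chars,
-- otherwise emit the current char and advance by 1
def pvScan : List Char → List Char
  | [] => []
  | c :: t =>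
    match pvFind ((c :: t).take 7) pvPairs with
    | some r => r ++ pvScan ((c :: t).drop 7)
    | none => c :: pvScan t
termination_by s => s.length
decreasing_by all_goals simp

def convert_color_to_color_alt (html_text : String) : String :=
  String.ofList (pvScan html_text.toList)

-- ===== PRECONDITION & SPEC =====
def Spec_convert_color_to_color (html_text : String) (out : String) : Prop := out = convert_color_to_color_alt html_text
instance (html_text : String) (out : String) : Decidable (Spec_convert_color_to_color html_text out) := by unfold Spec_convert_color_to_color; infer_instance

-- ===== CLAIM (what is proved, stated in full; the proofs are below) =====
def Claim_equal_convert_color_to_color : Prop := ∀ (html_text : String), Dom_convert_color_to_color html_text → Spec_convert_color_to_color html_text (convert_color_to_color html_text)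

-- ===== LEMMAS AND PROOFS =====

-- structural model of one CPython str.replace pass (nonempty pattern), over chars
def rep (old new : List Char) : List Char → List Char
  | [] => []
  | c :: t =>
    if old.isPrefixOf (c :: t) then new ++ rep old new (t.drop (old.length - 1))
    else c :: rep old new t
termination_by s => s.length
decreasing_by all_goals simp

lemma go_eq_rep (old new : List Char) (h : old ≠ []) :
    ∀ fuel l acc, l.length ≤ fuel →
      PySem.Chars.replace.go old new fuel l acc = acc.reverse ++ rep old new l := by
  intro fuel
  induction fuel with
  | zero =>
    intro l acc hl
    have : l = [] := List.eq_nil_of_length_eq_zero (Nat.le_zero.mp hl)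
    subst this
    simp [PySem.Chars.replace.go, rep]
  | succ n ih =>
    intro l acc hl
    cases l with
    | nil => simp [PySem.Chars.replace.go, rep]
    | cons c t =>
      rw [PySem.Chars.replace.go]
      by_cases hp : old.isPrefixOf (c :: t)
      · simp only [hp, if_true]
        obtain ⟨o0, ot, rfl⟩ : ∃ o0 ot, old = o0 :: ot := by
          cases old with
          | nil => exact absurd rfl h
          | cons a b => exact ⟨a, b, rfl⟩
        have hdrop : (c :: t).drop (o0 :: ot).length = t.drop ot.length := by simp
        rw [hdrop, ih (t.drop ot.length) (new.reverse ++ acc) (by simp at hl ⊢; omega)]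
        rw [rep]
        simp [hp]
      · simp only [hp]
        rw [ih t (c :: acc) (by simp at hl; omega), rep]
        simp [hp]

lemma replace_eq_rep (old new s : List Char) (h : old ≠ []) :
    PySem.Chars.replace s old new = rep old new s := by
  unfold PySem.Chars.replace
  rw [if_neg (by simpa [List.isEmpty_iff] using h)]
  rw [go_eq_rep old new h s.length s [] (le_refl _)]
  simp

-- the fold A performs, over chars
def repFold (s : List Char) : List Char :=
  pvPairs.foldl (fun l q => rep q.1 q.2 l) s

lemma foldl_replace_eq_repFold :
    ∀ (ps : List (List Char × List Char)), (∀ p ∈ ps, p.1 ≠ []) → ∀ s,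
      List.foldl (fun l p => PySem.Chars.replace l p.1 p.2) s ps
        = List.foldl (fun l q => rep q.1 q.2 l) s ps := by
  intro ps
  induction ps with
  | nil => intro _ s; rfl
  | cons p ps ih =>
    intro hne s
    simp only [List.foldl_cons]
    rw [replace_eq_rep _ _ _ (hne p (List.mem_cons_self))]
    exact ih (fun q hq => hne q (List.mem_cons_of_mem _ hq)) _

lemma toList_foldl_replace :
    ∀ (ps : List (String × String)) (h : String),
      (List.foldl (fun h p => PySem.Str.replace h p.1 p.2) h ps).toList
        = List.foldl (fun l p => PySem.Chars.replace l p.1 p.2) h.toList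
            (ps.map (fun p => (p.1.toList, p.2.toList))) := by
  intro ps
  induction ps with
  | nil => intro h; rfl
  | cons p ps ih =>
    intro h
    simp only [List.map_cons, List.foldl_cons]
    rw [ih, PySem.Str.toList_replace]

set_option maxRecDepth 4000 in
lemma pairs_key_ne_nil : ∀ p ∈ pvPairs, p.1 ≠ [] := by decide

lemma toList_A (h : String) : (convert_color_to_color h).toList = repFold h.toList := by
  unfold convert_color_to_color repFold
  rw [toList_foldl_replace]
  rw [foldl_replace_eq_repFold _ (by intro p hp; exact pairs_key_ne_nil p hp)]
  rfl

-- facts about the literal table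
set_option maxRecDepth 4000 in
lemma pairs_fact : ∀ p ∈ pvPairs, p.1.length = 7 ∧ p.2.length = 7 ∧
    p.1.head? = some '#' ∧ p.2.head? = some '#' ∧
    ('#' : Char) ∉ p.1.tail ∧ ('#' : Char) ∉ p.2.tail := by decide

set_option maxRecDepth 4000 in
lemma pairs_repl_ne_key : ∀ p ∈ pvPairs, ∀ q ∈ pvPairs, p.2 ≠ q.1 := by decide

-- a replace pass slides over a hash-free block
lemma rep_no_hash (old new : List Char) (hhead : old.head? = some '#') :
    ∀ (q : List Char), ('#' : Char) ∉ q → ∀ x,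
      rep old new (q ++ x) = q ++ rep old new x := by
  intro q
  induction q with
  | nil => intro _ x; simp
  | cons c q' ih =>
    intro hq x
    obtain ⟨o0, ot, rfl⟩ : ∃ o0 ot, old = o0 :: ot := by
      cases old with
      | nil => simp at hhead
      | cons a b => exact ⟨a, b, rfl⟩
    have ho : o0 = '#' := by simpa using hhead
    have hc : c ≠ '#' := by rintro rfl; exact hq List.mem_cons_self
    have hpre : (o0 :: ot).isPrefixOf (c :: (q' ++ x)) = false := by
      simp [List.isPrefixOf, ho]
      intro hcontra
      exact absurd hcontra.symm hc
    rw [List.cons_append, rep, hpre]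
    simp only [Bool.false_eq_true, if_false]
    rw [ih (fun hch => hq (List.mem_cons_of_mem _ hch)) x]
    rfl

-- a replace pass with pattern `old` slides over a full-length block p ≠ old
lemma rep_pass (old new p : List Char) (hlen : p.length = old.length) (hne : p ≠ old)
    (hhead : old.head? = some '#') (htail : ('#' : Char) ∉ p.tail) (x : List Char) :
    rep old new (p ++ x) = p ++ rep old new x := by
  cases p with
  | nil => simp
  | cons c pt =>
    have hpre : old.isPrefixOf ((c :: pt) ++ x) = false := by
      rw [Bool.eq_false_iff]
      intro hcontra
      have h1 : old <+: (c :: pt) ++ x := List.isPrefixOf_iff_prefix.mp hcontra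
      have h2 : old = List.take old.length ((c :: pt) ++ x) := List.prefix_iff_eq_take.mp h1
      rw [← hlen, List.take_left] at h2
      exact hne h2.symm
    rw [List.cons_append, rep]
    have hpre' : old.isPrefixOf (c :: (pt ++ x)) = false := by
      simpa using hpre
    rw [hpre']
    simp only [Bool.false_eq_true, if_false]
    rw [rep_no_hash old new hhead pt htail x]
    rfl

-- a replace pass fires on its own pattern
lemma rep_fire (old new : List Char) (h : old ≠ []) (x : List Char) :
    rep old new (old ++ x) = new ++ rep old new x := by
  obtain ⟨o0, ot, rfl⟩ : ∃ o0 ot, old = o0 :: ot := by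
    cases old with
    | nil => exact absurd rfl h
    | cons a b => exact ⟨a, b, rfl⟩
  have hpre : (o0 :: ot).isPrefixOf ((o0 :: ot) ++ x) = true :=
    List.isPrefixOf_iff_prefix.mpr (List.prefix_append _ _)
  rw [List.cons_append, rep]
  have hpre' : (o0 :: ot).isPrefixOf (o0 :: (ot ++ x)) = true := by simp
  rw [hpre']
  simp only [if_true]
  have : (o0 :: ot).length - 1 = ot.length := by simp
  rw [this, List.drop_left]

-- a replace pass with '#'-headed replacement either keeps a prefix window or puts '#' in it
lemma rep_window (old new : List Char) (hnew : new.head? = some '#') :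
    ∀ s n, (rep old new s).take n = s.take n ∨ '#' ∈ (rep old new s).take n := by
  intro s
  induction s with
  | nil => intro n; left; simp [rep]
  | cons c t ih =>
    intro n
    by_cases hp : old.isPrefixOf (c :: t)
    · rw [rep, if_pos hp]
      cases n with
      | zero => left; simp
      | succ m =>
        right
        obtain ⟨n0, nt, rfl⟩ : ∃ n0 nt, new = n0 :: nt := by
          cases new with
          | nil => simp at hnew
          | cons a b => exact ⟨a, b, rfl⟩
        have : n0 = '#' := by simpa using hnew
        subst this
        simp
    · rw [rep, if_neg hp]
      cases n with
      | zero => left; simp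
      | succ m =>
        rcases ih m with heq | hmem
        · left; simp [heq]
        · right; simp [List.mem_cons]; right; exact hmem

lemma pvFind_none (a : List Char) :
    ∀ ps, pvFind a ps = none → ∀ p ∈ ps, a ≠ p.1 := by
  intro ps
  induction ps with
  | nil => intro _ p hp; simp at hp
  | cons q ps ih =>
    intro hnone p hp
    obtain ⟨k, r⟩ := q
    rw [pvFind] at hnone
    by_cases hak : a = k
    · simp [hak] at hnone
    · rw [if_neg hak] at hnone
      rcases List.mem_cons.mp hp with rfl | hmem
      · exact hak
      · exact ih hnone p hmem

lemma pvFind_split (a r : List Char) :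
    ∀ ps, pvFind a ps = some r →
      ∃ pre post, ps = pre ++ (a, r) :: post ∧ ∀ p ∈ pre, a ≠ p.1 := by
  intro ps
  induction ps with
  | nil => intro h; simp [pvFind] at h
  | cons q ps ih =>
    intro h
    obtain ⟨k, v⟩ := q
    rw [pvFind] at h
    by_cases hak : a = k
    · rw [if_pos hak] at h
      obtain rfl : v = r := by simpa using h
      exact ⟨[], ps, by simp [hak], by simp⟩
    · rw [if_neg hak] at h
      obtain ⟨pre, post, hps, hpre⟩ := ih h
      refine ⟨(k, v) :: pre, post, by simp [hps], ?_⟩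
      intro p hp
      rcases List.mem_cons.mp hp with rfl | hmem
      · exact hak
      · exact hpre p hmem

-- pushing a common full-length block through a fold of passes
lemma foldl_rep_pass (p : List Char) :
    ∀ (ps : List (List Char × List Char)),
      (∀ q ∈ ps, ∀ x, rep q.1 q.2 (p ++ x) = p ++ rep q.1 q.2 x) → ∀ x,
      List.foldl (fun l q => rep q.1 q.2 l) (p ++ x) ps
        = p ++ List.foldl (fun l q => rep q.1 q.2 l) x ps := by
  intro ps
  induction ps with
  | nil => intro _ x; rfl
  | cons q ps ih =>
    intro hps x
    simp only [List.foldl_cons]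
    rw [hps q (List.mem_cons_self) x]
    exact ih (fun q' hq' => hps q' (List.mem_cons_of_mem _ hq')) _

-- "the current 7-char window is no key"
def NotKey (s : List Char) : Prop := ∀ p ∈ pvPairs, s.take 7 ≠ p.1

lemma step_none (k r : List Char) (hm : (k, r) ∈ pvPairs) (c : Char) (t : List Char)
    (h : NotKey (c :: t)) :
    rep k r (c :: t) = c :: rep k r t ∧ NotKey (c :: rep k r t) := by
  obtain ⟨hkl, hrl, hkh, hrh, hkt, hrt⟩ := pairs_fact (k, r) hm
  constructor
  · have hpre : k.isPrefixOf (c :: t) = false := by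
      rw [Bool.eq_false_iff]
      intro hcontra
      have h1 : k <+: c :: t := List.isPrefixOf_iff_prefix.mp hcontra
      have h2 : k = List.take k.length (c :: t) := List.prefix_iff_eq_take.mp h1
      rw [hkl] at h2
      exact h (k, r) hm h2.symm
    rw [rep, hpre]
    simp
  · intro p hp
    obtain ⟨hpl, _, hph, _, hpt, _⟩ := pairs_fact p hp
    rcases rep_window k r hrh t 6 with heq | hmem
    · intro hcontra
      apply h p hp
      have : (c :: rep k r t).take 7 = c :: (rep k r t).take 6 := by simp
      rw [this, heq] at hcontra
      simpa using hcontra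
    · intro hcontra
      have : (c :: rep k r t).take 7 = c :: (rep k r t).take 6 := by simp
      rw [this] at hcontra
      have htl : p.1.tail = (rep k r t).take 6 := by rw [← hcontra]; rfl
      exact hpt (htl ▸ hmem)

lemma fold_none :
    ∀ (ps : List (List Char × List Char)),
      (∀ q ∈ ps, q ∈ pvPairs) → ∀ (c : Char) (t : List Char), NotKey (c :: t) →
      List.foldl (fun l q => rep q.1 q.2 l) (c :: t) ps
        = c :: List.foldl (fun l q => rep q.1 q.2 l) t ps := by
  intro ps
  induction ps with
  | nil => intro _ c t _; rfl
  | cons q ps ih =>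
    intro hsub c t h
    obtain ⟨k, r⟩ := q
    obtain ⟨hstep, hinv⟩ := step_none k r (hsub (k, r) (List.mem_cons_self)) c t h
    simp only [List.foldl_cons]
    rw [hstep]
    exact ih (fun q' hq' => hsub q' (List.mem_cons_of_mem _ hq')) c (rep k r t) hinv

-- main: seven sequential passes equal the single scan
lemma rep_nil (old new : List Char) : rep old new [] = [] := by rw [rep]

lemma repFold_eq_pvScan : ∀ s, repFold s = pvScan s := by
  intro s
  induction s using pvScan.induct with
  | case1 =>
    rw [pvScan]
    simp [repFold, pvPairs, rep_nil]
  | case2 c t r hf ih =>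
    obtain ⟨pre, post, hdec, hpre⟩ := pvFind_split ((c :: t).take 7) r pvPairs hf
    have hmem : ((c :: t).take 7, r) ∈ pvPairs := by rw [hdec]; simp
    obtain ⟨hkl, hrl, hkh, hrh, hkt, hrt⟩ := pairs_fact _ hmem
    have hkl' : ((c :: t).take 7).length = 7 := hkl
    have hrl' : r.length = 7 := hrl
    have hkh' : ((c :: t).take 7).head? = some '#' := hkh
    have hrh' : r.head? = some '#' := hrh
    have hkt' : ('#' : Char) ∉ ((c :: t).take 7).tail := hkt
    have hrt' : ('#' : Char) ∉ r.tail := hrt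
    have hsplit : (c :: t) = (c :: t).take 7 ++ (c :: t).drop 7 :=
      (List.take_append_drop 7 (c :: t)).symm
    have hprepass : ∀ q ∈ pre, ∀ x,
        rep q.1 q.2 ((c :: t).take 7 ++ x) = (c :: t).take 7 ++ rep q.1 q.2 x := by
      intro q hq x
      have hqmem : q ∈ pvPairs := by rw [hdec]; exact List.mem_append_left _ hq
      obtain ⟨hql, _, hqh, _, _, _⟩ := pairs_fact q hqmem
      have hql' : q.1.length = 7 := hql
      exact rep_pass q.1 q.2 _ (by rw [hkl', hql']) (hpre q hq) hqh hkt' x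
    have hpostpass : ∀ q ∈ post, ∀ x, rep q.1 q.2 (r ++ x) = r ++ rep q.1 q.2 x := by
      intro q hq x
      have hqmem : q ∈ pvPairs := by
        rw [hdec]; exact List.mem_append_right _ (List.mem_cons_of_mem _ hq)
      obtain ⟨hql, _, hqh, _, _, _⟩ := pairs_fact q hqmem
      have hql' : q.1.length = 7 := hql
      exact rep_pass q.1 q.2 r (by rw [hrl', hql']) (pairs_repl_ne_key _ hmem q hqmem) hqh hrt' x
    have hknil : (c :: t).take 7 ≠ [] := by
      intro hcontra
      rw [hcontra] at hkl'
      simp at hkl'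
    calc repFold (c :: t)
        = List.foldl (fun l q => rep q.1 q.2 l)
            ((c :: t).take 7 ++ (c :: t).drop 7) pvPairs := by
          rw [repFold]; conv_lhs => rw [hsplit]
      _ = List.foldl (fun l q => rep q.1 q.2 l)
            (rep ((c :: t).take 7) r
              (List.foldl (fun l q => rep q.1 q.2 l) ((c :: t).take 7 ++ (c :: t).drop 7) pre))
            post := by rw [hdec, List.foldl_append, List.foldl_cons]
      _ = List.foldl (fun l q => rep q.1 q.2 l)
            (rep ((c :: t).take 7) r
              ((c :: t).take 7 ++ List.foldl (fun l q => rep q.1 q.2 l) ((c :: t).drop 7) pre))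
            post := by rw [foldl_rep_pass _ pre hprepass]
      _ = List.foldl (fun l q => rep q.1 q.2 l)
            (r ++ rep ((c :: t).take 7) r
              (List.foldl (fun l q => rep q.1 q.2 l) ((c :: t).drop 7) pre))
            post := by rw [rep_fire _ r hknil]
      _ = r ++ List.foldl (fun l q => rep q.1 q.2 l)
            (rep ((c :: t).take 7) r
              (List.foldl (fun l q => rep q.1 q.2 l) ((c :: t).drop 7) pre))
            post := by rw [foldl_rep_pass _ post hpostpass]
      _ = r ++ repFold ((c :: t).drop 7) := by
          rw [repFold, hdec, List.foldl_append, List.foldl_cons]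
      _ = r ++ pvScan ((c :: t).drop 7) := by rw [ih]
      _ = pvScan (c :: t) := by rw [pvScan, hf]
  | case3 c t hf ih =>
    have hnk : NotKey (c :: t) := fun p hp => pvFind_none _ pvPairs hf p hp
    have h2 : repFold (c :: t) = c :: repFold t :=
      fold_none pvPairs (fun q hq => hq) c t hnk
    rw [h2, ih, pvScan, hf]

-- ===== VERDICT (by name: the statement is the Claim_ definition above) =====
theorem convert_color_to_color_spec : Claim_equal_convert_color_to_color := by
  intro h _
  unfold Spec_convert_color_to_color convert_color_to_color_alt
  rw [← String.toList_inj, String.toList_ofList, toList_A, repFold_eq_pvScan]
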